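-- pv_equiv track=rewrite | github.com/calico-team/calico-sp24 | strgery/submissions/accepted/quad_match.py | max_matching_prefix
-- ===== SOURCE A (Python) =====
-- def max_matching_prefix(T, P):
--     """
--     Same has linear solution, but use naive matching
--     """
--     ret = 0
--     index = 0
--     for i in range(len(T)):
--         for j in range(len(P)):
--             if i+j >= len(T) or P[j] != T[i+j]:
--                 break
--             if j+1 > ret:
--                 ret = j+1
--                 index = i
--
--     return ret, index
-- ===== SOURCE B (Python) =====
-- def max_matching_prefix(T, P):
--     # Column-wise filtering: maintain the set of start positions whose match
--     # with P has survived the first j characters; stop when none survives.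
--     survivors = list(range(len(T)))
--     j = 0
--     for c in P:
--         nxt = [i for i in survivors if i + j < len(T) and T[i + j] == c]
--         if not nxt:
--             break
--         survivors = nxt
--         j += 1
--     return j, survivors[0] if j else 0
-- ===== Notes on version B (the rewrite author's own statement) =====
-- stated objective: alternative
-- what changed: A scans row-wise: for each start position it walks the pattern with a running (ret,index); B matches column-wise: it keeps the list of start positions that still match after j pattern characters, filtering it by one pattern character per round until it empties, so the answer is the round count and the first survivor.
import Mathlib
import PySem

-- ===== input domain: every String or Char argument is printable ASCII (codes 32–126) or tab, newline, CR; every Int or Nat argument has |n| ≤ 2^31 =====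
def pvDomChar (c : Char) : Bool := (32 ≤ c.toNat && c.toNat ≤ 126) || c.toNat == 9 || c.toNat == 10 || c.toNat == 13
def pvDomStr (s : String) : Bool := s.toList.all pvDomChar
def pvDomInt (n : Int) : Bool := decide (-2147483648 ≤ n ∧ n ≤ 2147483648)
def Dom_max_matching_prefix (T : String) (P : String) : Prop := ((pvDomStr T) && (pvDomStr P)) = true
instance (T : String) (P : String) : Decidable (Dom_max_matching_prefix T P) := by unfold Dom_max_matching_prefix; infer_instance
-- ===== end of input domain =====

-- B replaces A's row-wise scan (per start position, walk the pattern, running (ret,index))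
-- by column-wise candidate filtering: keep the start positions surviving j pattern chars,
-- filter by one pattern character per round until the set empties; answer = rounds, first survivor.

-- ===== PORT A =====
-- inner 'for j in range(len(P))' with break, carrying (ret, index)
def pvInnerA (Tc Pc : List Char) (i : Int) (ret index : Int) : List Int → Int × Int
  | [] => (ret, index)
  | j :: js =>
    if i + j ≥ (Tc.length : Int) ∨ PySem.List.pyGet? Pc j ≠ PySem.List.pyGet? Tc (i + j) then
      (ret, index)
    else if j + 1 > ret then pvInnerA Tc Pc i (j + 1) i js
    else pvInnerA Tc Pc i ret index js

def max_matching_prefix (T : String) (P : String) : List Int :=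
  let Tc := T.toList
  let Pc := P.toList
  let s := (PySem.List.pyRange 0 (Tc.length : Int) 1).foldl
    (fun (s : Int × Int) i => pvInnerA Tc Pc i s.1 s.2 (PySem.List.pyRange 0 (Pc.length : Int) 1))
    (0, 0)
  [s.1, s.2]

-- ===== PORT B =====
-- 'for c in P: nxt = [i for i in survivors if i+j < len(T) and T[i+j] == c]; if not nxt: break; …'
def pvFiltB (Tc : List Char) : List Char → List Int → Int → List Int × Int
  | [], survivors, j => (survivors, j)
  | c :: cs, survivors, j =>
    let nxt := survivors.filter
      (fun i => decide (i + j < (Tc.length : Int) ∧ PySem.List.pyGet? Tc (i + j) = some c))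
    if nxt = [] then (survivors, j) else pvFiltB Tc cs nxt (j + 1)

def max_matching_prefix_alt (T : String) (P : String) : List Int :=
  let Tc := T.toList
  let s := pvFiltB Tc P.toList (PySem.List.pyRange 0 (Tc.length : Int) 1) 0
  -- 'survivors[0]' cannot raise: j ≠ 0 implies the survivor list is nonempty, so getD 0 is unreachable
  [s.2, if s.2 ≠ 0 then (PySem.List.pyGet? s.1 0).getD 0 else 0]

-- ===== PRECONDITION & SPEC =====
def Spec_max_matching_prefix (T : String) (P : String) (out : List Int) : Prop := out = max_matching_prefix_alt T P
instance (T : String) (P : String) (out : List Int) : Decidable (Spec_max_matching_prefix T P out) := by unfold Spec_max_matching_prefix; infer_instance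

-- ===== CLAIM (what is proved, stated in full; the proofs are below) =====
def Claim_equal_max_matching_prefix : Prop := ∀ (T : String) (P : String), Dom_max_matching_prefix T P → Spec_max_matching_prefix T P (max_matching_prefix T P)

-- ===== LEMMAS AND PROOFS =====

-- longest common prefix length (proof-only reference quantity)
def pvLcp : List Char → List Char → Int
  | x :: xs, y :: ys => if x ≠ y then 0 else pvLcp xs ys + 1
  | _, _ => 0

theorem pvLcp_nonneg : ∀ p t, 0 ≤ pvLcp p t
  | [], _ => by simp [pvLcp]
  | _ :: _, [] => by simp [pvLcp]
  | x :: xs, y :: ys => by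
    simp only [pvLcp]; split
    · exact le_refl 0
    · have := pvLcp_nonneg xs ys; omega

theorem pvLcp_le_len : ∀ p t, pvLcp p t ≤ (p.length : Int)
  | [], _ => by simp [pvLcp]
  | _ :: _, [] => by simp [pvLcp]; positivity
  | x :: xs, y :: ys => by
    simp only [pvLcp]; split
    · simp; positivity
    · have := pvLcp_le_len xs ys; simp; omega

-- one-character unfolding of the lcp, at index j
theorem pvLcp_step : ∀ (p t : List Char) (j : Nat),
    ((j : Int) + 1 ≤ pvLcp p t) ↔
      ((j : Int) ≤ pvLcp p t ∧ j < p.length ∧ j < t.length ∧ p[j]? = t[j]?)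
  | [], t, j => by
    simp only [pvLcp, List.length_nil]
    constructor
    · intro h; omega
    · rintro ⟨_, h, _⟩; omega
  | x :: xs, [], j => by
    have h0 : pvLcp (x :: xs) [] = 0 := rfl
    simp only [h0, List.length_nil]
    constructor
    · intro h; omega
    · rintro ⟨_, _, h, _⟩; omega
  | x :: xs, y :: ys, j => by
    by_cases hxy : x = y
    · subst hxy
      simp only [pvLcp, ne_eq, not_true_eq_false, if_false]
      cases j with
      | zero =>
        have := pvLcp_nonneg xs ys
        simp; omega
      | succ k =>
        have hIH := pvLcp_step xs ys k
        have hc1 : ((k + 1 : Nat) : Int) + 1 ≤ pvLcp xs ys + 1 ↔ (k : Int) + 1 ≤ pvLcp xs ys := by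
          push_cast; omega
        have hc2 : ((k + 1 : Nat) : Int) ≤ pvLcp xs ys + 1 ↔ (k : Int) ≤ pvLcp xs ys := by
          push_cast; omega
        rw [hc1, hc2, hIH]
        simp
    · have h0 : pvLcp (x :: xs) (y :: ys) = 0 := by simp [pvLcp, hxy]
      rw [h0]
      constructor
      · intro h; omega
      · rintro ⟨h1, h2, h3, h4⟩
        cases j with
        | zero => simp at h4; exact absurd h4 hxy
        | succ k => omega

-- reference fold: running (best length, earliest argmax) over positions 0..n-1
def pvGold (Pc Tc : List Char) : Nat → Int × Int
  | 0 => (0, 0)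
  | n + 1 =>
    let s := pvGold Pc Tc n
    let L := pvLcp Pc (Tc.drop n)
    if L > s.1 then (L, (n : Int)) else s

theorem pvGold_fst_nonneg (Pc Tc : List Char) (n : Nat) : 0 ≤ (pvGold Pc Tc n).1 := by
  induction n with
  | zero => simp [pvGold]
  | succ n ih =>
    simp only [pvGold]; split
    · have := pvLcp_nonneg Pc (Tc.drop n); omega
    · exact ih

theorem pvGold_fst_le (Pc Tc : List Char) (n : Nat) : (pvGold Pc Tc n).1 ≤ (Pc.length : Int) := by
  induction n with
  | zero => simp only [pvGold]; positivity
  | succ n ih =>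
    simp only [pvGold]; split
    · exact pvLcp_le_len Pc (Tc.drop n)
    · exact ih

-- A's inner loop from position j₀ equals a single conditional update by the remaining lcp
theorem pvInnerA_spec (Tc Pc : List Char) (i j₀ : Nat) (ret idx : Int) :
    pvInnerA Tc Pc (i : Int) ret idx (PySem.List.pyRange (j₀ : Int) (Pc.length : Int) 1) =
      (if 0 < pvLcp (Pc.drop j₀) (Tc.drop (i + j₀)) ∧
          (j₀ : Int) + pvLcp (Pc.drop j₀) (Tc.drop (i + j₀)) > ret then
        ((j₀ : Int) + pvLcp (Pc.drop j₀) (Tc.drop (i + j₀)), (i : Int))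
      else (ret, idx)) := by
  generalize hfuel : Pc.length - j₀ = fuel
  induction fuel generalizing j₀ ret idx with
  | zero =>
    have hj : Pc.length ≤ j₀ := by omega
    rw [PySem.List.pyRange_one_eq_nil (by exact_mod_cast hj),
        List.drop_eq_nil_of_le hj]
    simp [pvInnerA, pvLcp]
  | succ fuel ih =>
    have hj : j₀ < Pc.length := by omega
    rw [PySem.List.pyRange_one_cons (by exact_mod_cast hj)]
    rw [List.drop_eq_getElem_cons hj]
    simp only [pvInnerA]
    by_cases hT : Tc.length ≤ i + j₀
    · rw [if_pos (Or.inl (by exact_mod_cast hT)), List.drop_eq_nil_of_le hT]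
      simp [pvLcp]
    · rw [Nat.not_le] at hT
      rw [List.drop_eq_getElem_cons hT]
      have hcast : (i : Int) + (j₀ : Int) = ((i + j₀ : Nat) : Int) := by push_cast; ring
      have hPg : PySem.List.pyGet? Pc (j₀ : Int) = some Pc[j₀] := by
        rw [PySem.List.pyGet?_natCast]
        exact List.getElem?_eq_getElem hj
      have hTg : PySem.List.pyGet? Tc ((i : Int) + (j₀ : Int)) = some Tc[i + j₀] := by
        rw [hcast, PySem.List.pyGet?_natCast]
        exact List.getElem?_eq_getElem hT
      by_cases hc : Pc[j₀] = Tc[i + j₀]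
      · rw [if_neg (by simp [hPg, hTg, hc]; omega)]
        have hcast1 : (j₀ : Int) + 1 = ((j₀ + 1 : Nat) : Int) := by push_cast; ring
        have hL' := pvLcp_nonneg (Pc.drop (j₀ + 1)) (Tc.drop (i + (j₀ + 1)))
        have harg : i + j₀ + 1 = i + (j₀ + 1) := by omega
        rw [hcast1]
        rw [ih (j₀ + 1) (((j₀ + 1 : Nat)) : Int) (i : Int) (by omega),
            ih (j₀ + 1) ret idx (by omega)]
        simp only [pvLcp, hc, ne_eq, not_true_eq_false, if_false, harg]
        set L' := pvLcp (List.drop (j₀ + 1) Pc) (List.drop (i + (j₀ + 1)) Tc) with hL'def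
        split_ifs <;> simp only [Prod.mk.injEq] <;>
          first | rfl | (refine ⟨?_, ?_⟩ <;> first | omega | trivial)
      · rw [if_pos (Or.inr (by simp [hPg, hTg, hc]))]
        simp [pvLcp, hc]

theorem pvA_fold (Tc Pc : List Char) (n : Nat) :
    ((List.range n).map Int.ofNat).foldl
        (fun (s : Int × Int) i => pvInnerA Tc Pc i s.1 s.2 (PySem.List.pyRange 0 (Pc.length : Int) 1))
        (0, 0) = pvGold Pc Tc n := by
  induction n with
  | zero => simp [pvGold]
  | succ n ih =>
    rw [List.range_succ, List.map_append, List.foldl_append, ih]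
    simp only [List.map, List.foldl]
    have hspec := pvInnerA_spec Tc Pc n 0 (pvGold Pc Tc n).1 (pvGold Pc Tc n).2
    rw [show ((0 : Nat) : Int) = 0 from rfl] at hspec
    rw [show Int.ofNat n = ((n : Nat) : Int) from rfl]
    simp only [List.drop_zero, Nat.add_zero, zero_add] at hspec
    rw [hspec]
    simp only [pvGold]
    set L := pvLcp Pc (Tc.drop n) with hL
    have h0 : 0 ≤ L := pvLcp_nonneg _ _
    have hs : 0 ≤ (pvGold Pc Tc n).1 := pvGold_fst_nonneg Pc Tc n
    split_ifs <;> first | rfl | (exfalso; omega)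

theorem pvGold_char (Pc Tc : List Char) (n : Nat) :
    (∀ j < n, pvLcp Pc (Tc.drop j) ≤ (pvGold Pc Tc n).1) ∧
    ((pvGold Pc Tc n).1 = 0 → (pvGold Pc Tc n).2 = 0) ∧
    (0 < (pvGold Pc Tc n).1 → ∃ k < n, (pvGold Pc Tc n).2 = (k : Int) ∧
      pvLcp Pc (Tc.drop k) = (pvGold Pc Tc n).1 ∧
      ∀ j < k, pvLcp Pc (Tc.drop j) < (pvGold Pc Tc n).1) := by
  induction n with
  | zero => simp [pvGold]
  | succ n ih =>
    obtain ⟨h1, h2, h3⟩ := ih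
    have hs : 0 ≤ (pvGold Pc Tc n).1 := pvGold_fst_nonneg Pc Tc n
    have hL0 : 0 ≤ pvLcp Pc (Tc.drop n) := pvLcp_nonneg _ _
    simp only [pvGold]
    by_cases h : pvLcp Pc (Tc.drop n) > (pvGold Pc Tc n).1
    · rw [if_pos h]
      refine ⟨?_, ?_, ?_⟩
      · intro j hj
        rcases Nat.lt_succ_iff_lt_or_eq.mp hj with hj | hj
        · exact le_trans (h1 j hj) (le_of_lt h)
        · subst hj; exact le_refl _
      · intro hz; simp at hz; omega
      · intro _
        exact ⟨n, Nat.lt_succ_self n, rfl, rfl, fun j hj => lt_of_le_of_lt (h1 j hj) h⟩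
    · rw [if_neg h]
      refine ⟨?_, h2, ?_⟩
      · intro j hj
        rcases Nat.lt_succ_iff_lt_or_eq.mp hj with hj | hj
        · exact h1 j hj
        · subst hj; omega
      · intro hpos
        obtain ⟨k, hk, hk2, hk3, hk4⟩ := h3 hpos
        exact ⟨k, Nat.lt_succ_of_lt hk, hk2, hk3, hk4⟩

theorem pvRange_cast (n : Nat) :
    PySem.List.pyRange 0 (n : Int) 1 = (List.range n).map Int.ofNat := by
  rw [PySem.List.pyRange_one]
  simp [Int.ofNat_eq_natCast]

theorem pvA_fold' (Tc Pc : List Char) :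
    (PySem.List.pyRange 0 (Tc.length : Int) 1).foldl
        (fun (s : Int × Int) i => pvInnerA Tc Pc i s.1 s.2 (PySem.List.pyRange 0 (Pc.length : Int) 1))
        (0, 0) = pvGold Pc Tc Tc.length := by
  rw [pvRange_cast Tc.length]
  exact pvA_fold Tc Pc Tc.length

-- survivors after j successful rounds: start positions whose lcp with P is at least j
def pvS (Pc Tc : List Char) (j : Nat) : List Int :=
  ((List.range Tc.length).filter (fun i => decide ((j : Int) ≤ pvLcp Pc (Tc.drop i)))).map Int.ofNat

theorem pvS_zero (Pc Tc : List Char) : pvS Pc Tc 0 = (List.range Tc.length).map Int.ofNat := by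
  unfold pvS
  congr 1
  apply List.filter_eq_self.mpr
  intro a _
  simpa using pvLcp_nonneg Pc (Tc.drop a)

theorem pvS_mem (Pc Tc : List Char) (j k : Nat) :
    Int.ofNat k ∈ pvS Pc Tc j ↔ (k < Tc.length ∧ (j : Int) ≤ pvLcp Pc (Tc.drop k)) := by
  unfold pvS
  rw [List.mem_map]
  constructor
  · rintro ⟨a, ha, hak⟩
    have : a = k := by simpa using hak
    subst this
    have := List.mem_filter.mp ha
    refine ⟨List.mem_range.mp this.1, by simpa using this.2⟩
  · rintro ⟨hk, hle⟩
    exact ⟨k, List.mem_filter.mpr ⟨List.mem_range.mpr hk, by simpa using hle⟩, rfl⟩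

theorem pvS_filter (Pc Tc : List Char) (j : Nat) (hj : j < Pc.length) :
    (pvS Pc Tc j).filter
        (fun i => decide (i + (j : Int) < (Tc.length : Int) ∧
          PySem.List.pyGet? Tc (i + (j : Int)) = some Pc[j])) = pvS Pc Tc (j + 1) := by
  unfold pvS
  rw [List.filter_map, List.filter_filter]
  congr 1
  apply List.filter_congr
  intro a ha
  have han : a < Tc.length := List.mem_range.mp ha
  have hcast : (Int.ofNat a) + (j : Int) = ((a + j : Nat) : Int) := by
    simp [Int.ofNat_eq_natCast]
  have hget : PySem.List.pyGet? Tc ((Int.ofNat a) + (j : Int)) = Tc[a + j]? := by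
    rw [hcast, PySem.List.pyGet?_natCast]
  have hstep := pvLcp_step Pc (Tc.drop a) j
  have hdlen : (Tc.drop a).length = Tc.length - a := List.length_drop
  have hdget : (Tc.drop a)[j]? = Tc[a + j]? := by
    rw [List.getElem?_drop]
  have hPj : Pc[j]? = some Pc[j] := List.getElem?_eq_getElem hj
  simp only [Function.comp_apply, hget, ← Bool.decide_and, decide_eq_decide]
  rw [show ((j + 1 : Nat) : Int) = (j : Int) + 1 by push_cast; ring, hstep, hdlen, hdget, hPj]
  constructor
  · rintro ⟨⟨h2, h3⟩, h1⟩
    have : a + j < Tc.length := by rw [hcast] at h2; exact_mod_cast h2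
    exact ⟨h1, hj, by omega, by rw [h3]⟩
  · rintro ⟨h1, _, h3, h4⟩
    have hlt : a + j < Tc.length := by omega
    exact ⟨⟨by rw [hcast]; exact_mod_cast hlt, h4.symm⟩, h1⟩

theorem pvFiltB_nil (Tc : List Char) (cs : List Char) (j : Int) :
    pvFiltB Tc cs [] j = ([], j) := by
  cases cs <;> simp [pvFiltB]

theorem pvFiltB_spec (Tc Pc : List Char) (j : Nat) (hj : j ≤ Pc.length)
    (hM : (j : Int) ≤ (pvGold Pc Tc Tc.length).1) (hne : pvS Pc Tc j ≠ []) :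
    pvFiltB Tc (Pc.drop j) (pvS Pc Tc j) (j : Int) =
      (pvS Pc Tc (pvGold Pc Tc Tc.length).1.toNat, (pvGold Pc Tc Tc.length).1) := by
  generalize hfuel : Pc.length - j = fuel
  induction fuel generalizing j with
  | zero =>
    have hjeq : j = Pc.length := by omega
    have hMj : (pvGold Pc Tc Tc.length).1 = (j : Int) := by
      have := pvGold_fst_le Pc Tc Tc.length
      omega
    rw [hMj, Int.toNat_natCast, List.drop_eq_nil_of_le (by omega)]
    simp [pvFiltB]
  | succ fuel ih =>
    have hjlt : j < Pc.length := by omega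
    have hfuel2 : Pc.length - (j + 1) = fuel := by omega
    obtain ⟨h1, h2, h3⟩ := pvGold_char Pc Tc Tc.length
    rw [List.drop_eq_getElem_cons hjlt]
    simp only [pvFiltB]
    rw [pvS_filter Pc Tc j hjlt]
    by_cases hnil : pvS Pc Tc (j + 1) = []
    · rw [if_pos hnil]
      have hMj : (pvGold Pc Tc Tc.length).1 = (j : Int) := by
        by_contra hne2
        have hMgt : ((j + 1 : Nat) : Int) ≤ (pvGold Pc Tc Tc.length).1 := by push_cast; omega
        have hMpos : 0 < (pvGold Pc Tc Tc.length).1 := by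
          have : (0 : Int) ≤ (j : Int) := by positivity
          omega
        obtain ⟨k, hk, _, hk3, _⟩ := h3 hMpos
        have : Int.ofNat k ∈ pvS Pc Tc (j + 1) :=
          (pvS_mem Pc Tc (j + 1) k).mpr ⟨hk, by rw [hk3]; exact hMgt⟩
        rw [hnil] at this
        simp at this
      rw [hMj, Int.toNat_natCast]
    · rw [if_neg hnil]
      obtain ⟨x, hx⟩ := List.exists_mem_of_ne_nil _ hnil
      obtain ⟨a, ha, hax⟩ := List.mem_map.mp hx
      have hmem2 := List.mem_filter.mp ha
      have hanlt : a < Tc.length := List.mem_range.mp hmem2.1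
      have halcp : ((j + 1 : Nat) : Int) ≤ pvLcp Pc (Tc.drop a) := by simpa using hmem2.2
      have haM : ((j + 1 : Nat) : Int) ≤ (pvGold Pc Tc Tc.length).1 :=
        le_trans halcp (h1 a hanlt)
      have hres := ih (j + 1) hjlt haM hnil hfuel2
      rw [show ((j : Int) + 1) = ((j + 1 : Nat) : Int) by push_cast; ring]
      exact hres

theorem pvFilterRange'_head (q : Nat → Bool) :
    ∀ (m s k : Nat), s ≤ k → k < s + m → q k = true → (∀ j, s ≤ j → j < k → q j = false) →
      ((List.range' s m).filter q).head? = some k := by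
  intro m
  induction m with
  | zero => intro s k h1 h2; omega
  | succ m ih =>
    intro s k h1 h2 hq hmin
    rw [List.range'_succ, List.filter_cons]
    by_cases hs : q s = true
    · have : k = s := by
        by_contra hne
        exact absurd hs (by simp [hmin s (le_refl s) (by omega)])
      subst this
      simp [hs]
    · have hsk : s < k := by
        rcases Nat.lt_or_ge s k with h | h
        · exact h
        · have : s = k := by omega
          subst this; exact absurd hq hs
      rw [if_neg (by simpa using hs)]
      exact ih (s + 1) k hsk (by omega) hq (fun j hj1 hj2 => hmin j (by omega) hj2)

theorem pvFilterRange_head (q : Nat → Bool) (n k : Nat) (hk : k < n) (hq : q k = true)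
    (hmin : ∀ j < k, q j = false) : ((List.range n).filter q).head? = some k := by
  rw [List.range_eq_range']
  exact pvFilterRange'_head q n 0 k (Nat.zero_le k) (by omega) hq (fun j _ hj => hmin j hj)

-- ===== VERDICT (by name: the statement is the Claim_ definition above) =====
theorem max_matching_prefix_spec : Claim_equal_max_matching_prefix := by
  intro T P _
  unfold Spec_max_matching_prefix max_matching_prefix max_matching_prefix_alt
  dsimp only
  rw [pvA_fold', pvRange_cast, ← pvS_zero P.toList T.toList]
  by_cases hn : T.toList.length = 0
  · have hS0 : pvS P.toList T.toList 0 = [] := by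
      unfold pvS
      rw [hn]
      simp
    rw [hS0, pvFiltB_nil, hn]
    simp [pvGold]
  · have hne : pvS P.toList T.toList 0 ≠ [] := by
      rw [pvS_zero]
      intro hmap
      have hlen := congrArg List.length hmap
      simp only [List.length_map, List.length_range, List.length_nil] at hlen
      exact hn hlen
    have h := pvFiltB_spec T.toList P.toList 0 (Nat.zero_le _)
      (by simpa using pvGold_fst_nonneg P.toList T.toList T.toList.length) hne
    simp only [List.drop_zero, Nat.cast_zero] at h
    rw [h]
    obtain ⟨h1, h2, h3⟩ := pvGold_char P.toList T.toList T.toList.length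
    by_cases hM0 : (pvGold P.toList T.toList T.toList.length).1 = 0
    · rw [h2 hM0, hM0]
      simp
    · have hMpos : 0 < (pvGold P.toList T.toList T.toList.length).1 :=
        lt_of_le_of_ne (pvGold_fst_nonneg P.toList T.toList T.toList.length) (Ne.symm hM0)
      obtain ⟨k, hk, hk2, hk3, hk4⟩ := h3 hMpos
      have hMn : ((pvGold P.toList T.toList T.toList.length).1.toNat : Int) =
          (pvGold P.toList T.toList T.toList.length).1 := Int.toNat_of_nonneg (le_of_lt hMpos)
      have hhead : ((List.range T.toList.length).filter
          (fun i => decide (((pvGold P.toList T.toList T.toList.length).1.toNat : Int) ≤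
            pvLcp P.toList (T.toList.drop i)))).head? = some k := by
        apply pvFilterRange_head _ _ _ hk
        · rw [decide_eq_true_eq, hMn, hk3]
        · intro j hjk
          rw [decide_eq_false_iff_not, hMn]
          have := hk4 j hjk
          omega
      have hh2 : (pvS P.toList T.toList
          (pvGold P.toList T.toList T.toList.length).1.toNat).head? = some (Int.ofNat k) := by
        unfold pvS
        rw [List.head?_map, hhead]
        rfl
      cases hcase : pvS P.toList T.toList (pvGold P.toList T.toList T.toList.length).1.toNat with
      | nil => rw [hcase] at hh2; simp at hh2
      | cons a l =>
        rw [hcase] at hh2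
        simp only [List.head?_cons, Option.some.injEq] at hh2
        subst hh2
        rw [hk2, if_pos hM0]
        rw [show (0 : Int) = ((0 : Nat) : Int) from rfl, PySem.List.pyGet?_natCast]
        simp [Int.ofNat_eq_natCast]
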